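-- pv_equiv track=rewrite | github.com/apenfe/intensivo_python | procesamiento_lenguaje/procesamiento.py | dic_palabras_comunes
-- ===== SOURCE A (Python) =====
-- def dic_palabras_comunes(tweets, cats, categoria, stopwords):
--     dicc = {}
--
--     for tweet, cat in zip(tweets, cats):
--         if cat == categoria:
--             for word in tweet.split(' '):
--                 if word not in stopwords:
--                     if word in dicc:
--                         dicc[word] += 1
--                     else:
--                         dicc[word] = 1
--
--     # Y organizarlo de forma descendente (de las palabras más comunes
--     #  a las menos comunes
--     dicc_sorted = {}
--     for k, v in sorted(dicc.items(), key=lambda item: item[1], reverse=True):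
--         dicc_sorted[k] = v
--
--     return dicc_sorted
-- ===== SOURCE B (Python) =====
-- def dic_palabras_comunes(tweets, cats, categoria, stopwords):
--     words = [w for t, c in zip(tweets, cats) if c == categoria
--              for w in t.split(' ') if w not in stopwords]
--     counts = {}
--     for w in words:
--         counts[w] = counts.get(w, 0) + 1
--     if not counts:
--         return {}
--     m = max(counts.values())
--     buckets = [[] for _ in range(m + 1)]
--     for w, v in counts.items():
--         buckets[v].append(w)
--     return {w: v for v in range(m, 0, -1) for w in buckets[v]}
-- ===== Notes on version B (the rewrite author's own statement) =====
-- stated objective: alternative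
-- what changed: B flattens the category-filtered tweets into one word list, counts it with a single dict pass, and replaces sorted() by a stable counting/bucket sort over the count values (buckets filled in insertion order, emitted from the max count down).
import Mathlib
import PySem

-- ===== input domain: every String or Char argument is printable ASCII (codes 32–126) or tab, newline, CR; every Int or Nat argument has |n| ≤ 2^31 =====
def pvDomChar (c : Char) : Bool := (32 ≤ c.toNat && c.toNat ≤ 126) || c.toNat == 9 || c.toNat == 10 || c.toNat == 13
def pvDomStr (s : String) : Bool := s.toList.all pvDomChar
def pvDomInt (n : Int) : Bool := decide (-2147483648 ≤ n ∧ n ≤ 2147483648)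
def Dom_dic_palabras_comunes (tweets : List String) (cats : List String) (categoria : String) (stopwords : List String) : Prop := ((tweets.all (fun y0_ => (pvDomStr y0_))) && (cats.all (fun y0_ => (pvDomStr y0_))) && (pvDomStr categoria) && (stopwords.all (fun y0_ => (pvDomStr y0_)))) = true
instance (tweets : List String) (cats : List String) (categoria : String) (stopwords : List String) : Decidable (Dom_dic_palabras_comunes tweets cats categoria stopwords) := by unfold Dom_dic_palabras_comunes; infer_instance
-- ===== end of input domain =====

-- B replaces A's comparison sort of the frequency dict by a stable counting/bucket sort over the
-- count values (and builds the counts from one flat filtered word list instead of nested loops);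
-- same return value, alternative algorithm.

-- t.split(' '): the separator " " is nonempty, so PySem.Str.split? is always `some`; getD [] is unreachable.
def pvSplitSpace (s : String) : List String := (PySem.Str.split? s " ").getD []

-- ===== PORT A =====
def dic_palabras_comunes (tweets : List String) (cats : List String) (categoria : String) (stopwords : List String) : List (String × Int) :=
  let dicc : PySem.Dict String Int :=
    (tweets.zip cats).foldl (fun d p =>
      if p.2 == categoria then
        (pvSplitSpace p.1).foldl (fun d w =>
          if !(stopwords.contains w) then
            if d.contains w then d.insert w (d.getD w 0 + 1) else d.insert w 1
          else d) d
      else d) PySem.Dict.empty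
  let dicc_sorted : PySem.Dict String Int :=
    (PySem.List.sorted dicc.items (fun it => it.2) true).foldl
      (fun d kv => d.insert kv.1 kv.2) PySem.Dict.empty
  dicc_sorted.items

-- ===== PORT B =====
def dic_palabras_comunes_alt (tweets : List String) (cats : List String) (categoria : String) (stopwords : List String) : List (String × Int) :=
  let words : List String :=
    ((tweets.zip cats).filter (fun p => p.2 == categoria)).flatMap
      (fun p => (pvSplitSpace p.1).filter (fun w => !(stopwords.contains w)))
  let counts : PySem.Dict String Int :=
    words.foldl (fun d w => d.insert w (d.getD w 0 + 1)) PySem.Dict.empty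
  if counts.items.isEmpty then [] else
  match PySem.List.max? counts.values (fun v => v) with
  | none => []  -- unreachable: counts is nonempty here
  | some m =>
    let buckets : List (List String) :=
      counts.items.foldl (fun b p => b.set p.2.toNat ((b.getD p.2.toNat []) ++ [p.1]))
        (List.replicate (m + 1).toNat [])
    let res : PySem.Dict String Int :=
      (PySem.List.pyRange m 0 (-1)).foldl
        (fun d v => (buckets.getD v.toNat []).foldl (fun d w => d.insert w v) d) PySem.Dict.empty
    res.items

-- ===== PRECONDITION & SPEC =====
def Spec_dic_palabras_comunes (tweets : List String) (cats : List String) (categoria : String) (stopwords : List String) (out : List (String × Int)) : Prop := out = dic_palabras_comunes_alt tweets cats categoria stopwords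
instance (tweets : List String) (cats : List String) (categoria : String) (stopwords : List String) (out : List (String × Int)) : Decidable (Spec_dic_palabras_comunes tweets cats categoria stopwords out) := by unfold Spec_dic_palabras_comunes; infer_instance

-- ===== CLAIM (what is proved, stated in full; the proofs are below) =====
def Claim_equal_dic_palabras_comunes : Prop := ∀ (tweets : List String) (cats : List String) (categoria : String) (stopwords : List String), Dom_dic_palabras_comunes tweets cats categoria stopwords → Spec_dic_palabras_comunes tweets cats categoria stopwords (dic_palabras_comunes tweets cats categoria stopwords)

-- ===== LEMMAS AND PROOFS =====

-- The word list B flattens out of the filtered tweets.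
def pvWords (tweets : List String) (cats : List String) (categoria : String) (stopwords : List String) : List String :=
  ((tweets.zip cats).filter (fun p => p.2 == categoria)).flatMap
    (fun p => (pvSplitSpace p.1).filter (fun w => !(stopwords.contains w)))

-- Bucket concatenation: for each value u of vs in turn, the items with that count, in their original order.
def pvBuckets (vs : List Int) (xs : List (String × Int)) : List (String × Int) :=
  vs.flatMap (fun u => xs.filter (fun p => p.2 == u))

theorem pvBuckets_nil (vs : List Int) : pvBuckets vs [] = [] := by
  simp [pvBuckets]

theorem pvBuckets_append_notmem (vs : List Int) (xs : List (String × Int)) (x : String × Int)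
    (h : x.2 ∉ vs) : pvBuckets vs (xs ++ [x]) = pvBuckets vs xs := by
  induction vs with
  | nil => rfl
  | cons u t ih =>
    simp only [pvBuckets, List.flatMap_cons] at *
    rw [ih (by simp_all), List.filter_append]
    have : List.filter (fun p => p.2 == u) [x] = [] := by
      have : (x.2 == u) = false := by simp_all
      simp [List.filter, this]
    simp [this]

theorem pvInsertBy_skip (x : String × Int) (P S : List (String × Int))
    (h : ∀ y ∈ P, ¬ (y.2 < x.2)) :
    PySem.List.insertBy (fun a b => decide (b.2 < a.2)) x (P ++ S)
      = P ++ PySem.List.insertBy (fun a b => decide (b.2 < a.2)) x S := by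
  induction P with
  | nil => rfl
  | cons y t ih =>
    simp only [List.cons_append, PySem.List.insertBy]
    rw [if_neg (by simpa using h y (by simp)), ih (fun z hz => h z (by simp [hz]))]

theorem pvInsertBy_front (x : String × Int) (S : List (String × Int))
    (h : ∀ y ∈ S, y.2 < x.2) :
    PySem.List.insertBy (fun a b => decide (b.2 < a.2)) x S = x :: S := by
  cases S with
  | nil => rfl
  | cons y t =>
    simp only [PySem.List.insertBy]
    rw [if_pos (by simpa using h y (by simp))]

-- Inserting one element of count v (v ∈ vs, vs strictly descending) into the bucket
-- concatenation appends it to the end of its bucket.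
theorem pvInsertBy_buckets (vs : List Int) (hd : vs.Pairwise (· > ·))
    (xs : List (String × Int)) (x : String × Int) (hv : x.2 ∈ vs) :
    PySem.List.insertBy (fun a b => decide (b.2 < a.2)) x (pvBuckets vs xs)
      = pvBuckets vs (xs ++ [x]) := by
  induction vs with
  | nil => simp at hv
  | cons u t ih =>
    have hpw := (List.pairwise_cons.mp hd).1
    have hdt := (List.pairwise_cons.mp hd).2
    simp only [pvBuckets, List.flatMap_cons]
    by_cases hu : x.2 = u
    · -- x goes to the end of the first bucket
      have hnotmem : x.2 ∉ t := fun hmem => absurd (hpw _ hmem) (by omega)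
      rw [pvInsertBy_skip x _ _ (by
          intro y hy
          have : y.2 = u := by simpa using (List.mem_filter.mp hy).2
          omega),
        pvInsertBy_front x _ (by
          intro y hy
          obtain ⟨u', hu', hy'⟩ := List.mem_flatMap.mp hy
          have : y.2 = u' := by simpa using (List.mem_filter.mp hy').2
          have := hpw _ hu'
          omega)]
      have h1 : List.flatMap (fun u => List.filter (fun p => p.2 == u) (xs ++ [x])) t
          = List.flatMap (fun u => List.filter (fun p => p.2 == u) xs) t :=
        pvBuckets_append_notmem t xs x hnotmem
      have h2 : List.filter (fun p => p.2 == u) (xs ++ [x])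
          = List.filter (fun p => p.2 == u) xs ++ [x] := by
        rw [List.filter_append]
        have : (x.2 == u) = true := by simp [hu]
        simp [List.filter, this]
      rw [h1, h2]
      simp
    · -- x belongs further down: skip the first bucket
      have hvt : x.2 ∈ t := by cases hv with
        | head => exact absurd rfl hu
        | tail _ h => exact h
      have hlt : x.2 < u := hpw _ hvt
      rw [pvInsertBy_skip x _ _ (by
          intro y hy
          have : y.2 = u := by simpa using (List.mem_filter.mp hy).2
          omega)]
      have h2 : List.filter (fun p => p.2 == u) (xs ++ [x])
          = List.filter (fun p => p.2 == u) xs := by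
        rw [List.filter_append]
        have : (x.2 == u) = false := by simp [hu]
        simp [List.filter, this]
      have h3 : PySem.List.insertBy (fun a b => decide (b.2 < a.2)) x
          (List.flatMap (fun u => List.filter (fun p => p.2 == u) xs) t)
          = List.flatMap (fun u => List.filter (fun p => p.2 == u) (xs ++ [x])) t := ih hdt hvt
      rw [h3, h2]

-- A stable descending sort by count IS the bucket concatenation over a strictly
-- descending list of values covering every count.
theorem pvSorted_rev_eq_buckets (vs : List Int) (hd : vs.Pairwise (· > ·))
    (xs : List (String × Int)) (h : ∀ p ∈ xs, p.2 ∈ vs) :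
    PySem.List.sorted xs (fun it => it.2) true = pvBuckets vs xs := by
  rw [PySem.List.sorted_rev_eq_foldl_insertBy]
  induction xs using List.reverseRecOn with
  | nil => simp [pvBuckets_nil]
  | append_singleton xs x ih =>
    rw [List.foldl_append, List.foldl_cons, List.foldl_nil,
      ih (fun p hp => h p (by simp [hp])),
      pvInsertBy_buckets vs hd xs x (h x (by simp))]

theorem pvGetD_set (l : List (List String)) (j i : Nat) (v : List String) (hj : j < l.length) :
    (l.set j v).getD i [] = if i = j then v else l.getD i [] := by
  simp only [List.getD_eq_getElem?_getD, List.getElem?_set]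
  by_cases h : j = i
  · subst h; simp [hj]
  · simp [h, Ne.symm h]

-- The bucket array after B's filling loop: bucket i holds the first components of the
-- items whose count is i, in item order.
theorem pvBucketsFold_getD (n : Nat) (xs : List (String × Int))
    (hx : ∀ p ∈ xs, 0 ≤ p.2 ∧ p.2.toNat < n) (i : Nat) (hi : i < n) :
    (xs.foldl (fun b p => b.set p.2.toNat ((b.getD p.2.toNat []) ++ [p.1]))
        (List.replicate n [])).getD i []
      = (xs.filter (fun p => p.2.toNat == i)).map (fun p => p.1) := by
  induction xs using List.reverseRecOn with
  | nil => simp [List.getD_eq_getElem?_getD, hi]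
  | append_singleton xs x ih =>
    have hlen : ∀ (ys : List (String × Int)),
        (ys.foldl (fun b p => b.set p.2.toNat ((b.getD p.2.toNat []) ++ [p.1]))
          (List.replicate n [])).length = n := by
      intro ys
      induction ys using List.reverseRecOn with
      | nil => simp
      | append_singleton ys y ih2 =>
        rw [List.foldl_append, List.foldl_cons, List.foldl_nil, List.length_set]
        exact ih2
    rw [List.foldl_append, List.foldl_cons, List.foldl_nil, List.filter_append]
    have hx2 := hx x (by simp)
    rw [pvGetD_set _ _ _ _ (by rw [hlen]; exact hx2.2)]
    by_cases hcase : i = x.2.toNat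
    · subst hcase
      rw [if_pos rfl, ih (fun p hp => hx p (by simp [hp]))]
      have hfil1 : List.filter (fun p => p.2.toNat == x.2.toNat) [x] = [x] := by
        simp [List.filter]
      rw [hfil1]
      simp
    · rw [if_neg hcase, ih (fun p hp => hx p (by simp [hp]))]
      have : List.filter (fun p => p.2.toNat == i) [x] = [] := by
        have : (x.2.toNat == i) = false := by simp; omega
        simp [List.filter, this]
      rw [this]
      simp

theorem pvPyRangeDown (m : Int) :
    PySem.List.pyRange m 0 (-1) = List.map (fun k : Nat => m - (k:Int)) (List.range m.toNat) := by
  simp only [PySem.List.pyRange]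
  norm_num
  by_cases h : 0 < m
  · rw [if_pos h]
    apply List.map_congr_left; intro k _; ring
  · have : m.toNat = 0 := by omega
    rw [if_neg h]; simp [this]

theorem pvPyRangeDown_pairwise (m : Int) : (PySem.List.pyRange m 0 (-1)).Pairwise (· > ·) := by
  rw [pvPyRangeDown]
  refine List.pairwise_map.mpr ?_
  refine List.Pairwise.imp ?_ (List.pairwise_lt_range (n := m.toNat))
  intro a b hab; omega

theorem pvMem_pyRangeDown (m v : Int) (h1 : 1 ≤ v) (h2 : v ≤ m) :
    v ∈ PySem.List.pyRange m 0 (-1) := by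
  rw [pvPyRangeDown]
  refine List.mem_map.mpr ⟨(m - v).toNat, List.mem_range.mpr (by omega), by omega⟩

theorem pvMem_of_mem_pyRangeDown (m v : Int) (h : v ∈ PySem.List.pyRange m 0 (-1)) :
    1 ≤ v ∧ v ≤ m := by
  rw [pvPyRangeDown] at h
  obtain ⟨k, hk, hv⟩ := List.mem_map.mp h
  have := List.mem_range.mp hk
  omega

-- A's inner word loop equals the fold of the same step over the filtered words.
theorem pvInner_fold (stopwords : List String) (ws : List String) (d : PySem.Dict String Int) :
    ws.foldl (fun d w =>
        if !(stopwords.contains w) then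
          if d.contains w then d.insert w (d.getD w 0 + 1) else d.insert w 1
        else d) d
      = (ws.filter (fun w => !(stopwords.contains w))).foldl
          (fun d w => d.insert w (d.getD w 0 + 1)) d := by
  induction ws generalizing d with
  | nil => rfl
  | cons w t ih =>
    simp only [List.foldl_cons, List.filter_cons]
    by_cases h : stopwords.contains w
    · have hb : (!stopwords.contains w) = false := by rw [h]; rfl
      rw [hb]
      simp only [Bool.false_eq_true, if_false]
      exact ih d
    · have hb : (!stopwords.contains w) = true := by cases hc : stopwords.contains w <;> simp_all
      rw [hb]
      simp only [if_true, List.foldl_cons]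
      rw [ih]
      congr 1
      by_cases hc : d.contains w
      · rw [if_pos hc]
      · rw [if_neg (by simp [hc]), PySem.Dict.getD_of_not_contains d 0 (by simpa using hc)]
        norm_num

-- A's nested counting loops build exactly Counter(words) for B's flat word list.
theorem pvDicc_eq_counter (tweets cats : List String) (categoria : String) (stopwords : List String) :
    ((tweets.zip cats).foldl (fun d p =>
        if p.2 == categoria then
          (pvSplitSpace p.1).foldl (fun d w =>
            if !(stopwords.contains w) then
              if d.contains w then d.insert w (d.getD w 0 + 1) else d.insert w 1
            else d) d
        else d) PySem.Dict.empty)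
      = PySem.Dict.counter (pvWords tweets cats categoria stopwords) := by
  unfold pvWords
  rw [← PySem.Dict.foldl_insert_getD_add_one_eq_counter]
  generalize PySem.Dict.empty = d
  induction tweets.zip cats generalizing d with
  | nil => rfl
  | cons p t ih =>
    simp only [List.foldl_cons, List.filter_cons]
    by_cases h : p.2 == categoria
    · rw [if_pos h, if_pos h]
      simp only [List.flatMap_cons, List.foldl_append]
      rw [pvInner_fold, ih]
    · rw [if_neg h, if_neg h]
      exact ih d

-- ===== VERDICT (by name: the statement is the Claim_ definition above) =====
theorem dic_palabras_comunes_spec : Claim_equal_dic_palabras_comunes := by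
  intro tweets cats categoria stopwords _
  unfold Spec_dic_palabras_comunes dic_palabras_comunes dic_palabras_comunes_alt
  dsimp only
  rw [pvDicc_eq_counter]
  rw [show ((tweets.zip cats).filter (fun p => p.2 == categoria)).flatMap
      (fun p => (pvSplitSpace p.1).filter (fun w => !(stopwords.contains w)))
      = pvWords tweets cats categoria stopwords from rfl]
  set words := pvWords tweets cats categoria stopwords with hw
  rw [PySem.Dict.foldl_insert_getD_add_one_eq_counter]
  set C := PySem.Dict.counter words with hC
  by_cases hne : C.items = []
  · rw [if_pos (by rw [hne]; rfl)]
    rw [hne]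
    rfl
  · rw [if_neg (by simp [hne])]
    -- the max exists
    have hvals : C.values = C.items.map (fun p => p.2) := rfl
    obtain ⟨m, hm⟩ : ∃ m, PySem.List.max? C.values (fun v => v) = some m := by
      cases hmx : PySem.List.max? C.values (fun v => v) with
      | none =>
        exact absurd ((PySem.List.max?_eq_none_iff _ _).mp hmx)
          (by simp [hvals, hne])
      | some m => exact ⟨m, rfl⟩
    rw [hm]
    -- every item's count is in [1, m]
    have hitems := PySem.Dict.items_counter words
    have hbound : ∀ p ∈ C.items, 1 ≤ p.2 ∧ p.2 ≤ m := by
      intro p hp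
      constructor
      · rw [← hC] at hitems
        rw [hitems] at hp
        obtain ⟨k, hk, hpk⟩ := List.mem_map.mp hp
        have : k ∈ words := (PySem.Set.mem_ofList words k).mp hk
        have : 1 ≤ List.count k words := List.count_pos_iff.mpr this
        rw [← hpk]; simpa using this
      · exact PySem.List.max?_isMax hm p.2 (by
          rw [hvals]; exact List.mem_map.mpr ⟨p, hp, rfl⟩)
    have hm1 : 1 ≤ m := by
      cases hx : C.items with
      | nil => exact absurd hx hne
      | cons p t =>
        have := hbound p (by rw [hx]; simp)
        omega
    -- A's side: the stable descending sort is the bucket concatenation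
    rw [pvSorted_rev_eq_buckets (PySem.List.pyRange m 0 (-1)) (pvPyRangeDown_pairwise m)
      C.items (fun p hp => pvMem_pyRangeDown m p.2 (hbound p hp).1 (hbound p hp).2)]
    -- B's side: its nested dict-building fold is the same fold over the same list
    apply congrArg PySem.Dict.items
    rw [pvBuckets, List.foldl_flatMap]
    apply PySem.List.foldl_congr_mem
    intro acc v hv
    have hvr := pvMem_of_mem_pyRangeDown m v hv
    rw [pvBucketsFold_getD (m + 1).toNat C.items
        (fun p hp => ⟨by have := (hbound p hp).1; omega,
                      by have := (hbound p hp).2; have := (hbound p hp).1; omega⟩)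
        v.toNat (by omega)]
    have hfil : C.items.filter (fun p => p.2.toNat == v.toNat)
        = C.items.filter (fun p => p.2 == v) := by
      apply List.filter_congr
      intro p hp
      have := (hbound p hp).1
      have h2 : 0 ≤ p.2 := by omega
      cases hb : (p.2.toNat == v.toNat) <;> cases hb2 : (p.2 == v) <;> simp_all; omega
    rw [hfil, List.foldl_map]
    apply PySem.List.foldl_congr_mem
    intro acc2 p hp
    have : p.2 = v := by simpa using (List.mem_filter.mp hp).2
    rw [this]
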